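-- pv_equiv track=rewrite | github.com/zqinglin/SleepPredictor | src/labels_csv.py | _infer_person_from_ids
-- ===== SOURCE A (Python) =====
-- from typing import Dict, List
--
-- def _infer_person_from_ids(cfg: Dict, wrist_id: int, mattress_id: int) -> str:
--     for key, person in cfg['people'].items():
--         if person.get('wrist_id') == wrist_id and person.get('mattress_id') == mattress_id:
--             return key
--     # 允许仅凭其中一个ID匹配
--     for key, person in cfg['people'].items():
--         if person.get('wrist_id') == wrist_id or person.get('mattress_id') == mattress_id:
--             return key
--     raise ValueError(f'无法根据设备ID匹配人员: 手环{wrist_id} 床垫{mattress_id}')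
-- ===== SOURCE B (Python) =====
-- def _infer_person_from_ids(cfg, wrist_id, mattress_id):
--     partial = None
--     for key, person in cfg['people'].items():
--         w_ok = person.get('wrist_id') == wrist_id
--         m_ok = person.get('mattress_id') == mattress_id
--         if w_ok and m_ok:
--             return key
--         if partial is None and (w_ok or m_ok):
--             partial = key
--     if partial is not None:
--         return partial
--     raise ValueError(f'无法根据设备ID匹配人员: 手环{wrist_id} 床垫{mattress_id}')
-- ===== Notes on version B (the rewrite author's own statement) =====
-- stated objective: faster
-- what changed: Replaces A's two full scans over cfg['people'] (first for a full match, then for a partial match) by a single pass that returns a full match immediately and remembers the first partial candidate in an accumulator.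
import Mathlib
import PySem

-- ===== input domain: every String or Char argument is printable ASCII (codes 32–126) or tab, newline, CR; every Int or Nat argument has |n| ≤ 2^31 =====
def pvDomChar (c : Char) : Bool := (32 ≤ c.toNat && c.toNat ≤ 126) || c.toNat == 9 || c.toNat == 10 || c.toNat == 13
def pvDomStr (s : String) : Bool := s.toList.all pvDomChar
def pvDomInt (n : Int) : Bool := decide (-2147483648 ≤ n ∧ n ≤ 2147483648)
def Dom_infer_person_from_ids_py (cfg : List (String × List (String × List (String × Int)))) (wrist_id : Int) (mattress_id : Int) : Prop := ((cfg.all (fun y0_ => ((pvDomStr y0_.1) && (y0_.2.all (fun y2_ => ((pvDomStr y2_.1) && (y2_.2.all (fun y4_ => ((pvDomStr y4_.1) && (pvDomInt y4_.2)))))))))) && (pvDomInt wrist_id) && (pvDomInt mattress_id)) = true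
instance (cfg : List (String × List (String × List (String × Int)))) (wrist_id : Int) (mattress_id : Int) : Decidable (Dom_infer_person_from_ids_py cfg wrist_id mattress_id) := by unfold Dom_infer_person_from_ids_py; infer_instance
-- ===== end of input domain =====

-- B replaces A's two full scans by a single pass that returns a full match immediately
-- and remembers the first partial candidate (constant-factor saving; same result).
-- dict lookup on an association list: first match (Python dict .get / [] semantics)
def pvLookup {α : Type} (d : List (String × α)) (k : String) : Option α :=
  (d.find? (fun kv => kv.1 == k)).map (·.2)

-- ===== PORT A =====
-- first loop of A: full match on both ids
def aFull (w m : Int) : List (String × List (String × Int)) → Option String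
  | [] => none
  | kp :: rest =>
    if (pvLookup kp.2 "wrist_id" == some w) && (pvLookup kp.2 "mattress_id" == some m)
    then some kp.1 else aFull w m rest

-- second loop of A: partial match on either id
def aPartial (w m : Int) : List (String × List (String × Int)) → Option String
  | [] => none
  | kp :: rest =>
    if (pvLookup kp.2 "wrist_id" == some w) || (pvLookup kp.2 "mattress_id" == some m)
    then some kp.1 else aPartial w m rest

def infer_person_from_ids_py (cfg : List (String × List (String × List (String × Int)))) (wrist_id : Int) (mattress_id : Int) : String :=
  let people := (pvLookup cfg "people").getD []
  match aFull wrist_id mattress_id people with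
  | some k => k
  | none =>
    match aPartial wrist_id mattress_id people with
    | some k => k
    | none => ""  -- Python raises ValueError here; excluded by Pre_

-- ===== PORT B =====
-- single pass: return a full match at once, remember the first partial candidate
def bLoop (w m : Int) (acc : Option String) : List (String × List (String × Int)) → Option String
  | [] => acc
  | kp :: rest =>
    let wok := pvLookup kp.2 "wrist_id" == some w
    let mok := pvLookup kp.2 "mattress_id" == some m
    if wok && mok then some kp.1
    else bLoop w m (if acc.isNone && (wok || mok) then some kp.1 else acc) rest

def infer_person_from_ids_py_alt (cfg : List (String × List (String × List (String × Int)))) (wrist_id : Int) (mattress_id : Int) : String :=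
  match bLoop wrist_id mattress_id none ((pvLookup cfg "people").getD []) with
  | some k => k
  | none => ""  -- Python raises ValueError here; excluded by Pre_

-- ===== PRECONDITION & SPEC =====
-- Pre_ excludes exactly the inputs where the Python A raises: a cfg without a 'people' key
-- (KeyError) and a cfg where no person matches either id (ValueError).
def Pre_infer_person_from_ids_py (cfg : List (String × List (String × List (String × Int)))) (wrist_id : Int) (mattress_id : Int) : Prop :=
  (pvLookup cfg "people").isSome = true ∧
  ((pvLookup cfg "people").getD []).any
    (fun kp => (pvLookup kp.2 "wrist_id" == some wrist_id) || (pvLookup kp.2 "mattress_id" == some mattress_id)) = true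
instance (cfg : List (String × List (String × List (String × Int)))) (wrist_id : Int) (mattress_id : Int) : Decidable (Pre_infer_person_from_ids_py cfg wrist_id mattress_id) := by unfold Pre_infer_person_from_ids_py; infer_instance

def pvWitness_infer_person_from_ids_py : (List (String × List (String × List (String × Int)))) × Int × Int :=
  ([("people", [("alice", [("wrist_id", 1), ("mattress_id", 2)]), ("bob", [("wrist_id", 3)])])], 1, 2)

def Spec_infer_person_from_ids_py (cfg : List (String × List (String × List (String × Int)))) (wrist_id : Int) (mattress_id : Int) (out : String) : Prop := out = infer_person_from_ids_py_alt cfg wrist_id mattress_id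
instance (cfg : List (String × List (String × List (String × Int)))) (wrist_id : Int) (mattress_id : Int) (out : String) : Decidable (Spec_infer_person_from_ids_py cfg wrist_id mattress_id out) := by unfold Spec_infer_person_from_ids_py; infer_instance

-- ===== CLAIM (what is proved, stated in full; the proofs are below) =====
def Claim_equal_infer_person_from_ids_py : Prop := ∀ (cfg : List (String × List (String × List (String × Int)))) (wrist_id : Int) (mattress_id : Int), Dom_infer_person_from_ids_py cfg wrist_id mattress_id → Pre_infer_person_from_ids_py cfg wrist_id mattress_id → Spec_infer_person_from_ids_py cfg wrist_id mattress_id (infer_person_from_ids_py cfg wrist_id mattress_id)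

-- ===== LEMMAS AND PROOFS =====
-- B's single pass computes A's two-pass result: a full match wins, otherwise the
-- accumulator (first partial seen so far), otherwise the first partial in the rest.
theorem bLoop_eq (w m : Int) (acc : Option String) (ps : List (String × List (String × Int))) :
    bLoop w m acc ps =
      match aFull w m ps with
      | some k => some k
      | none => match acc with
        | some q => some q
        | none => aPartial w m ps := by
  induction ps generalizing acc with
  | nil => cases acc <;> simp [bLoop, aFull, aPartial]
  | cons kp rest ih =>
    simp only [bLoop, aFull, aPartial]
    by_cases hw : (pvLookup kp.2 "wrist_id" == some w) = true <;>
      by_cases hm : (pvLookup kp.2 "mattress_id" == some m) = true <;>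
      cases acc <;>
      simp [hw, hm, ih]

-- ===== VERDICT (by name: the statement is the Claim_ definition above) =====
theorem infer_person_from_ids_py_spec : Claim_equal_infer_person_from_ids_py := by
  intro cfg w m _ _
  unfold Spec_infer_person_from_ids_py infer_person_from_ids_py infer_person_from_ids_py_alt
  rw [bLoop_eq]
  rcases h1 : aFull w m ((pvLookup cfg "people").getD []) with _ | k <;>
    rcases h2 : aPartial w m ((pvLookup cfg "people").getD []) with _ | q <;> simp [h1, h2]
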